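-- pv_equiv track=rewrite | github.com/F-D-G-L/fdgl-homepage | fotogrid.py | fotogrid
-- ===== SOURCE A (Python) =====
-- def fotogrid(image_urls):
--     """
--     Provide a simple responsive fotogrid using flex layout.
--     Depends on the css/fotogrid.css defined styles.
--     Use jinja {{ fotogrid([....]) }} from templates (registered in app.py)
--     """
--     if len(image_urls) == 0:
--         return ""
--
--     # prepare our 'bins', the columsn of the fotogrid
--     nbr_of_columns = 4
--     prepared_column = []
--     for i in range(nbr_of_columns):
--         prepared_column.append([])
--     # sort given image URL into bins
--     for i in range(len(image_urls)):
--         prepared_column[i % nbr_of_columns].append(image_urls[i])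
--
--     # form HTML div structure from prepared bins
--     html = '<div class="fotorow">'
--     for column in prepared_column:
--         if len(column) > 0:
--             html += '<div class="fotocolumn">'
--             for url in column:
--                 html += '<img src="' + url + '" style="width:100%">'
--             html += "</div>"  # closing fotocolumn
--     html += "</div>"  # closing fotorow
--
--     return html
-- ===== SOURCE B (Python) =====
-- def fotogrid(image_urls):
--     """
--     Same HTML fotogrid, computed without the mutable 4-bin distribution pass:
--     each column is read off directly by a strided index comprehension and the
--     HTML is assembled in one join expression.
--     """
--     if len(image_urls) == 0:
--         return ""
--     columns = [[image_urls[i] for i in range(j, len(image_urls), 4)] for j in range(4)]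
--     return ('<div class="fotorow">'
--             + ''.join('<div class="fotocolumn">'
--                       + ''.join('<img src="' + url + '" style="width:100%">' for url in col)
--                       + '</div>'
--                       for col in columns if col)
--             + '</div>')
-- ===== Notes on version B (the rewrite author's own statement) =====
-- stated objective: simpler
-- what changed: Instead of distributing the URLs into four mutable bins by index modulo 4 and accumulating the HTML string piece by piece, B reads each column directly as a strided index comprehension and assembles the whole HTML in a single join expression.
import Mathlib
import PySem

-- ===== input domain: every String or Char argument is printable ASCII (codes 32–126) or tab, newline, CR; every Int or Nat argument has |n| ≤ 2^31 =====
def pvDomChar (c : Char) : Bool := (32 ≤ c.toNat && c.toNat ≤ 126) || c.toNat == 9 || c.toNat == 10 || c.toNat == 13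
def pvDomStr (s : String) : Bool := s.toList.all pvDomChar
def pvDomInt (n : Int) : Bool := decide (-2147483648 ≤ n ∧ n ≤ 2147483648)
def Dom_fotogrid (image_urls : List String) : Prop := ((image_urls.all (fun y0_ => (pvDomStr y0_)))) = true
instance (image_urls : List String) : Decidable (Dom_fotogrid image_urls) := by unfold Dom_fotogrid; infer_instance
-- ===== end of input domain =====

-- B replaces A's mutable 4-bin distribution pass and piecewise string accumulation by
-- direct strided-index column comprehensions joined in one expression (objective: simpler).

-- ===== PORT A =====
def fotogrid (image_urls : List String) : String :=
  if image_urls.length = 0 then "" else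
    -- nbr_of_columns = 4
    let prepared_column : List (List String) :=
      (PySem.List.pyRange 0 4 1).foldl (fun acc _ => acc ++ [([] : List String)]) []
    -- prepared_column[i % 4].append(image_urls[i]): in-place append ported as read-modify-set;
    -- both indices are always in range, so pyGetD/pySetD are exact here
    let prepared_column :=
      (PySem.List.pyRange 0 (image_urls.length : Int) 1).foldl
        (fun cols i =>
          PySem.List.pySetD cols (PySem.Int.mod i 4)
            ((PySem.List.pyGetD cols (PySem.Int.mod i 4) []) ++ [PySem.List.pyGetD image_urls i ""]))
        prepared_column
    let html := "<div class=\"fotorow\">"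
    let html := prepared_column.foldl
      (fun html column =>
        if 0 < column.length then
          (column.foldl
            (fun html url => html ++ "<img src=\"" ++ url ++ "\" style=\"width:100%\">")
            (html ++ "<div class=\"fotocolumn\">")) ++ "</div>"
        else html) html
    html ++ "</div>"

-- ===== PORT B =====
def fotogrid_alt (image_urls : List String) : String :=
  if image_urls.length = 0 then "" else
    let columns : List (List String) :=
      (PySem.List.pyRange 0 4 1).map (fun j =>
        (PySem.List.pyRange j (image_urls.length : Int) 4).map
          (fun i => PySem.List.pyGetD image_urls i ""))
    "<div class=\"fotorow\">"
      ++ PySem.Str.join "" ((columns.filter (fun col => !col.isEmpty)).map (fun col =>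
           "<div class=\"fotocolumn\">"
             ++ PySem.Str.join "" (col.map
                  (fun url => "<img src=\"" ++ url ++ "\" style=\"width:100%\">"))
             ++ "</div>"))
      ++ "</div>"

-- ===== PRECONDITION & SPEC =====
def Spec_fotogrid (image_urls : List String) (out : String) : Prop := out = fotogrid_alt image_urls
instance (image_urls : List String) (out : String) : Decidable (Spec_fotogrid image_urls out) := by unfold Spec_fotogrid; infer_instance

-- ===== CLAIM (what is proved, stated in full; the proofs are below) =====
def Claim_equal_fotogrid : Prop := ∀ (image_urls : List String), Dom_fotogrid image_urls → Spec_fotogrid image_urls (fotogrid image_urls)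

-- ===== LEMMAS AND PROOFS =====

-- the j-th of four round-robin columns, structurally
def strideCol : List String → Nat → List String
  | [], _ => []
  | x :: xs, 0 => x :: strideCol xs 3
  | _ :: xs, j+1 => strideCol xs j

-- elements of xs whose (start-offset s) position is ≡ j (mod 4)
def pick : List String → Int → Int → List String
  | [], _, _ => []
  | x :: xs, s, j => (if PySem.Int.mod s 4 = j then [x] else []) ++ pick xs (s+1) j

-- B's column as the port computes it
def colB (xs : List String) (j : Int) : List String :=
  (PySem.List.pyRange j (xs.length : Int) 4).map (fun i => PySem.List.pyGetD xs i "")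

def blockOf (col : List String) : String :=
  "<div class=\"fotocolumn\">"
    ++ PySem.Str.join "" (col.map (fun url => "<img src=\"" ++ url ++ "\" style=\"width:100%\">"))
    ++ "</div>"

lemma join_empty_cons (x : String) (l : List String) :
    PySem.Str.join "" (x :: l) = x ++ PySem.Str.join "" l := by
  apply String.toList_injective
  cases l with
  | nil =>
      simp [PySem.Str.toList_join, PySem.Chars.join_singleton, String.toList_append,
        PySem.Chars.join_nil]
  | cons y ys =>
      simp [PySem.Str.toList_join, PySem.Chars.join_cons_cons, String.toList_append]

lemma join_empty_nil : PySem.Str.join "" ([] : List String) = "" := rfl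

lemma pick_cons (x : String) (xs : List String) (s j : Int) :
    pick (x :: xs) s j = (if PySem.Int.mod s 4 = j then [x] else []) ++ pick xs (s+1) j := rfl

lemma inner_fold (col : List String) (h : String) :
    col.foldl (fun h2 url => h2 ++ "<img src=\"" ++ url ++ "\" style=\"width:100%\">") h
      = h ++ PySem.Str.join "" (col.map (fun url => "<img src=\"" ++ url ++ "\" style=\"width:100%\">")) := by
  induction col generalizing h with
  | nil => rw [List.map_nil, join_empty_nil, String.append_empty, List.foldl_nil]
  | cons u us ih =>
      rw [List.foldl_cons, List.map_cons, join_empty_cons, ih]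
      simp [String.append_assoc]

lemma outer_fold (cols : List (List String)) (h : String) :
    cols.foldl
      (fun html column =>
        if 0 < column.length then
          (column.foldl
            (fun html url => html ++ "<img src=\"" ++ url ++ "\" style=\"width:100%\">")
            (html ++ "<div class=\"fotocolumn\">")) ++ "</div>"
        else html) h
    = h ++ PySem.Str.join "" ((cols.filter (fun col => !col.isEmpty)).map blockOf) := by
  induction cols generalizing h with
  | nil => rw [List.filter_nil, List.map_nil, join_empty_nil, String.append_empty, List.foldl_nil]
  | cons c cs ih =>
    by_cases hc : c = []
    · subst hc
      simp [ih]
    · have hlen : 0 < c.length := List.length_pos_iff.mpr hc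
      have hemp : c.isEmpty = false := by simp [hc]
      simp only [List.foldl_cons, List.filter_cons, hemp, if_pos hlen, Bool.not_false,
        List.map_cons, if_true]
      rw [inner_fold, ih, join_empty_cons]
      simp [blockOf, String.append_assoc]

lemma dist_fold (xs : List String) : ∀ (s : Int) (c0 c1 c2 c3 : List String),
    (PySem.List.enumerate xs s).foldl
      (fun cols p =>
        PySem.List.pySetD cols (PySem.Int.mod p.1 4)
          ((PySem.List.pyGetD cols (PySem.Int.mod p.1 4) []) ++ [p.2])) [c0, c1, c2, c3]
    = [c0 ++ pick xs s 0, c1 ++ pick xs s 1, c2 ++ pick xs s 2, c3 ++ pick xs s 3] := by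
  induction xs with
  | nil => intro s c0 c1 c2 c3; simp [PySem.List.enumerate, pick]
  | cons x xs ih =>
    intro s c0 c1 c2 c3
    rw [PySem.List.enumerate_cons, List.foldl_cons]
    have h0 := PySem.Int.mod_nonneg s (by norm_num : (0:Int) < 4)
    have h1 := PySem.Int.mod_lt s (by norm_num : (0:Int) < 4)
    have hm : PySem.Int.mod s 4 = 0 ∨ PySem.Int.mod s 4 = 1 ∨ PySem.Int.mod s 4 = 2 ∨
        PySem.Int.mod s 4 = 3 := by omega
    rcases hm with hm | hm | hm | hm
    · rw [hm,
        show PySem.List.pySetD [c0, c1, c2, c3] (0:Int)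
            ((PySem.List.pyGetD [c0, c1, c2, c3] (0:Int) []) ++ [x]) = [c0 ++ [x], c1, c2, c3]
          from rfl, ih]
      simp only [pick_cons, hm]
      simp [List.append_assoc]
    · rw [hm,
        show PySem.List.pySetD [c0, c1, c2, c3] (1:Int)
            ((PySem.List.pyGetD [c0, c1, c2, c3] (1:Int) []) ++ [x]) = [c0, c1 ++ [x], c2, c3]
          from rfl, ih]
      simp only [pick_cons, hm]
      simp [List.append_assoc]
    · rw [hm,
        show PySem.List.pySetD [c0, c1, c2, c3] (2:Int)
            ((PySem.List.pyGetD [c0, c1, c2, c3] (2:Int) []) ++ [x]) = [c0, c1, c2 ++ [x], c3]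
          from rfl, ih]
      simp only [pick_cons, hm]
      simp [List.append_assoc]
    · rw [hm,
        show PySem.List.pySetD [c0, c1, c2, c3] (3:Int)
            ((PySem.List.pyGetD [c0, c1, c2, c3] (3:Int) []) ++ [x]) = [c0, c1, c2, c3 ++ [x]]
          from rfl, ih]
      simp only [pick_cons, hm]
      simp [List.append_assoc]

lemma pick_eq_stride (xs : List String) : ∀ (s : Int) (j : Nat), j < 4 →
    pick xs s (j:Int) = strideCol xs (((j:Int) - s) % 4).toNat := by
  induction xs with
  | nil => intro s j hj; rfl
  | cons x xs ih =>
    intro s j hj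
    have hmod := PySem.Int.mod_eq_emod_of_pos (a := s) (b := (4:Int)) (by norm_num)
    have h04 : ((j:Int) - s) % 4 = 0 ∨ ((j:Int) - s) % 4 = 1 ∨ ((j:Int) - s) % 4 = 2 ∨
        ((j:Int) - s) % 4 = 3 := by omega
    rcases h04 with h | h | h | h
    · have hsj : PySem.Int.mod s 4 = (j:Int) := by rw [hmod]; omega
      have ht : (((j:Int) - s) % 4).toNat = 0 := by omega
      have ht' : (((j:Int) - (s+1)) % 4).toNat = 3 := by omega
      rw [ht]
      show (if PySem.Int.mod s 4 = (j:Int) then [x] else []) ++ pick xs (s+1) (j:Int)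
          = strideCol (x :: xs) 0
      rw [if_pos hsj, ih (s+1) j hj, ht']
      rfl
    · have hsj : ¬ PySem.Int.mod s 4 = (j:Int) := by rw [hmod]; omega
      have ht : (((j:Int) - s) % 4).toNat = 1 := by omega
      have ht' : (((j:Int) - (s+1)) % 4).toNat = 0 := by omega
      rw [ht]
      show (if PySem.Int.mod s 4 = (j:Int) then [x] else []) ++ pick xs (s+1) (j:Int)
          = strideCol (x :: xs) 1
      rw [if_neg hsj, ih (s+1) j hj, ht']
      rfl
    · have hsj : ¬ PySem.Int.mod s 4 = (j:Int) := by rw [hmod]; omega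
      have ht : (((j:Int) - s) % 4).toNat = 2 := by omega
      have ht' : (((j:Int) - (s+1)) % 4).toNat = 1 := by omega
      rw [ht]
      show (if PySem.Int.mod s 4 = (j:Int) then [x] else []) ++ pick xs (s+1) (j:Int)
          = strideCol (x :: xs) 2
      rw [if_neg hsj, ih (s+1) j hj, ht']
      rfl
    · have hsj : ¬ PySem.Int.mod s 4 = (j:Int) := by rw [hmod]; omega
      have ht : (((j:Int) - s) % 4).toNat = 3 := by omega
      have ht' : (((j:Int) - (s+1)) % 4).toNat = 2 := by omega
      rw [ht]
      show (if PySem.Int.mod s 4 = (j:Int) then [x] else []) ++ pick xs (s+1) (j:Int)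
          = strideCol (x :: xs) 3
      rw [if_neg hsj, ih (s+1) j hj, ht']
      rfl

lemma pyRange_shift4 (a b : Int) :
    PySem.List.pyRange (a+1) (b+1) 4 = (PySem.List.pyRange a b 4).map (· + 1) := by
  rw [PySem.List.pyRange_of_pos _ _ (by norm_num), PySem.List.pyRange_of_pos _ _ (by norm_num)]
  by_cases hab : a < b
  · rw [if_pos (by omega), if_pos hab]
    have hcount : b + 1 - (a + 1) + 4 - 1 = b - a + 4 - 1 := by ring
    rw [hcount, List.map_map]
    apply List.map_congr_left
    intro k _
    simp
    ring
  · rw [if_neg (by omega), if_neg hab]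
    simp

lemma pyRange_cons4 (a b : Int) (hab : a < b) :
    PySem.List.pyRange a b 4 = a :: PySem.List.pyRange (a+4) b 4 := by
  rw [PySem.List.pyRange_of_pos _ _ (by norm_num), PySem.List.pyRange_of_pos _ _ (by norm_num)]
  rw [if_pos hab]
  by_cases h2 : a + 4 < b
  · rw [if_pos h2]
    have hc : ((b - a + 4 - 1)/4).toNat = ((b - (a+4) + 4 - 1)/4).toNat + 1 := by omega
    rw [hc, List.range_succ_eq_map, List.map_cons, List.map_map]
    congr 1
    · simp
    · apply List.map_congr_left
      intro k _
      simp only [Function.comp_apply]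
      push_cast
      ring
  · rw [if_neg h2]
    have hone : ((b - a + 4 - 1)/4).toNat = 1 := by omega
    rw [hone]
    simp

lemma pyGetD_cons_shift (x : String) (xs : List String) (i : Int) (hi : 0 ≤ i) :
    PySem.List.pyGetD (x::xs) (i+1) "" = PySem.List.pyGetD xs i "" := by
  simp only [PySem.List.pyGetD, PySem.List.pyGet?, PySem.List.pyIdx?, List.length_cons]
  by_cases h : i < (xs.length : Int)
  · rw [if_pos (by omega), if_pos (by push_cast; omega), if_pos hi, if_pos h]
    have hT : (i+1).toNat = i.toNat + 1 := by omega
    simp [hT]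
  · rw [if_pos (by omega), if_neg (by push_cast; omega), if_pos hi, if_neg h]
    rfl

lemma colB_cons_succ (x : String) (xs : List String) (j : Int) (hj : 0 ≤ j) :
    colB (x::xs) (j+1) = colB xs j := by
  unfold colB
  rw [List.length_cons]
  rw [show ((xs.length + 1 : Nat) : Int) = (xs.length : Int) + 1 by push_cast; ring]
  rw [pyRange_shift4, List.map_map]
  apply List.map_congr_left
  intro i hi
  have hi0 : 0 ≤ i := by
    have := (PySem.List.mem_pyRange_iff_of_pos (by norm_num) i).mp hi
    omega
  simpa using pyGetD_cons_shift x xs i hi0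

lemma colB_cons_zero (x : String) (xs : List String) : colB (x::xs) 0 = x :: colB xs 3 := by
  unfold colB
  rw [List.length_cons]
  rw [show ((xs.length + 1 : Nat) : Int) = (xs.length : Int) + 1 by push_cast; ring]
  have hpos : (0:Int) < (xs.length : Int) + 1 := by positivity
  rw [pyRange_cons4 0 _ hpos, List.map_cons]
  congr 1
  · simp only [PySem.List.pyGetD, PySem.List.pyGet?, PySem.List.pyIdx?, List.length_cons]
    rw [if_pos (le_refl (0:Int)), if_pos (by push_cast; omega)]
    rfl
  rw [show (0:Int) + 4 = 3 + 1 by ring, pyRange_shift4, List.map_map]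
  apply List.map_congr_left
  intro i hi
  have hi0 : 0 ≤ i := by
    have := (PySem.List.mem_pyRange_iff_of_pos (by norm_num) i).mp hi
    omega
  simpa using pyGetD_cons_shift x xs i hi0

lemma colB_nil (j : Int) (hj : 0 ≤ j) : colB [] j = [] := by
  unfold colB
  rw [PySem.List.pyRange_of_pos _ _ (by norm_num)]
  rw [if_neg (by simp; omega)]
  simp

lemma colB_eq_stride (xs : List String) : ∀ (j : Nat), j < 4 → colB xs (j:Int) = strideCol xs j := by
  induction xs with
  | nil => intro j hj; rw [colB_nil _ (by positivity)]; rfl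
  | cons x xs ih =>
    intro j hj
    match j with
    | 0 =>
      rw [show ((0:Nat):Int) = 0 by simp, colB_cons_zero]
      have := ih 3 (by omega)
      rw [show ((3:Nat):Int) = 3 by simp] at this
      rw [this]
      rfl
    | Nat.succ j =>
      rw [show ((Nat.succ j : Nat):Int) = (j:Int) + 1 by push_cast; ring]
      rw [colB_cons_succ _ _ _ (by positivity)]
      rw [ih j (by omega)]
      rfl

-- ===== VERDICT (by name: the statement is the Claim_ definition above) =====
theorem fotogrid_spec : Claim_equal_fotogrid := by
  intro xs _
  show fotogrid xs = fotogrid_alt xs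
  by_cases h : xs.length = 0
  · simp [fotogrid, fotogrid_alt, h]
  · have henum := PySem.List.enumerate_eq_map_pyRange xs ""
    rw [PySem.List.len_eq xs] at henum
    have hdist2 :
        (PySem.List.pyRange 0 (xs.length : Int) 1).foldl
          (fun cols i =>
            PySem.List.pySetD cols (PySem.Int.mod i 4)
              ((PySem.List.pyGetD cols (PySem.Int.mod i 4) []) ++ [PySem.List.pyGetD xs i ""]))
          [[], [], [], []]
        = [strideCol xs 0, strideCol xs 1, strideCol xs 2, strideCol xs 3] := by
      have hd := dist_fold xs 0 [] [] [] []
      rw [henum, List.foldl_map] at hd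
      have hp : ∀ j : Nat, j < 4 → pick xs 0 (j:Int) = strideCol xs j := by
        intro j hj
        rw [pick_eq_stride xs 0 j hj]
        congr 1
        omega
      have hp0 := hp 0 (by omega)
      have hp1 := hp 1 (by omega)
      have hp2 := hp 2 (by omega)
      have hp3 := hp 3 (by omega)
      norm_num at hp0 hp1 hp2 hp3
      rw [hp0, hp1, hp2, hp3] at hd
      simpa using hd
    have hb : ∀ j : Nat, j < 4 →
        (PySem.List.pyRange (j:Int) (xs.length : Int) 4).map (fun i => PySem.List.pyGetD xs i "")
          = strideCol xs j := fun j hj => colB_eq_stride xs j hj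
    have hb0 := hb 0 (by omega)
    have hb1 := hb 1 (by omega)
    have hb2 := hb 2 (by omega)
    have hb3 := hb 3 (by omega)
    norm_num at hb0 hb1 hb2 hb3
    simp only [fotogrid, fotogrid_alt]
    rw [if_neg h, if_neg h]
    rw [show (PySem.List.pyRange 0 4 1).foldl (fun acc _ => acc ++ [([] : List String)]) []
        = [[], [], [], []] from rfl]
    rw [hdist2]
    rw [outer_fold]
    rw [show PySem.List.pyRange 0 4 1 = [(0:Int), 1, 2, 3] from rfl]
    simp only [List.map_cons, List.map_nil]
    rw [hb0, hb1, hb2, hb3]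
    rfl
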